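-- pv_equiv track=rewrite | github.com/nicekim2000/CodingTest | 포탑부수기.py | bfs
-- ===== SOURCE A (Python) =====
-- from collections import deque
--
-- def bfs(zido, start, end, n, m):
--     visited = [[False for _ in range(m)] for _ in range(n)]
--     queue = deque([(start, 0)])  # (position, distance)
--     directions = [(0, 1), (1, 0), (0, -1), (-1, 0)]  # 우, 하, 좌, 상
--     prev = {start: None}
--
--     while queue:
--         (r, c), dist = queue.popleft()
--         if (r, c) == end:
--             path = []
--             while (r, c) != start:
--                 path.append((r, c))
--                 r, c = prev[(r, c)]
--             path.append(start)
--             return dist, list(reversed(path))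
--         for dr, dc in directions:
--             nr, nc = (r + dr) % n, (c + dc) % m
--             if not visited[nr][nc] and zido[nr][nc] > 0:
--                 visited[nr][nc] = True
--                 prev[(nr, nc)] = (r, c)
--                 queue.append(((nr, nc), dist + 1))
--
--     return -1, []
-- ===== SOURCE B (Python) =====
-- def bfs(zido, start, end, n, m):
--     # Level-synchronized BFS: no deque and no prev dict; each depth's frontier
--     # is a plain list of (cell, path-from-start) that is first scanned for the
--     # target and otherwise expanded as a whole into the next frontier.
--     visited = [[False] * m for _ in range(n)]
--     frontier = [(start, [start])]
--     depth = 0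
--     while frontier:
--         for cell, path in frontier:
--             if cell == end:
--                 return depth, path
--         nxt = []
--         for (r, c), path in frontier:
--             for pos in ((r % n, (c + 1) % m), ((r + 1) % n, c % m),
--                         (r % n, (c - 1) % m), ((r - 1) % n, c % m)):
--                 if not visited[pos[0]][pos[1]] and zido[pos[0]][pos[1]] > 0:
--                     visited[pos[0]][pos[1]] = True
--                     nxt.append((pos, path + [pos]))
--         frontier = nxt
--         depth += 1
--     return -1, []
-- ===== Notes on version B (the rewrite author's own statement) =====
-- stated objective: alternative
-- what changed: A's deque-driven BFS with a prev-pointer dict and a backtracking reconstruction loop is replaced by a level-synchronized BFS: each depth's frontier is a plain list of (cell, path-from-start) pairs that is scanned for the target and otherwise expanded wholesale into the next frontier, so there is no deque, no prev dict and no reconstruction pass.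
import Mathlib
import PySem

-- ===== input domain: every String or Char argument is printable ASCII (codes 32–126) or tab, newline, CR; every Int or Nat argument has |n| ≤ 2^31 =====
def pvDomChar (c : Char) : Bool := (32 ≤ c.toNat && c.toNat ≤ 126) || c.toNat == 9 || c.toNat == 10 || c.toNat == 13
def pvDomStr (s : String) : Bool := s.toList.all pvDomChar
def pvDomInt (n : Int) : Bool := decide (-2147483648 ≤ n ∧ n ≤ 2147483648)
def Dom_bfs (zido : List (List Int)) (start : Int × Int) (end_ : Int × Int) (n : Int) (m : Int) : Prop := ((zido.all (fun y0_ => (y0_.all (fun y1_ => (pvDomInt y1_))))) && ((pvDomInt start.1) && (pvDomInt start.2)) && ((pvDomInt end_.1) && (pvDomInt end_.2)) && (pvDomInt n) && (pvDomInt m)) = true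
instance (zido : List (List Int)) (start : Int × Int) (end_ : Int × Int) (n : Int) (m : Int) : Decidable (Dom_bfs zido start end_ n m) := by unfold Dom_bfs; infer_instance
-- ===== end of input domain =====

-- B (alternative): level-synchronized BFS — each depth's frontier is a plain list of
-- (cell, path-from-start) pairs, scanned for the target and otherwise expanded
-- wholesale into the next frontier; no deque, no prev dict, no reconstruction pass.

-- shared grid helpers (both Pythons index visited/zido the same way)
def pvGetB (v : List (List Bool)) (x : Int × Int) : Bool :=
  (v.getD x.1.toNat []).getD x.2.toNat false

def pvSetB (v : List (List Bool)) (x : Int × Int) : List (List Bool) :=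
  v.set x.1.toNat ((v.getD x.1.toNat []).set x.2.toNat true)

def pvZ (zido : List (List Int)) (x : Int × Int) : Int :=
  (zido.getD x.1.toNat []).getD x.2.toNat 0

-- ===== PORT A =====
def pvWrap (p : Int × Int) (d : Int × Int) (n m : Int) : Int × Int :=
  (PySem.Int.mod (p.1 + d.1) n, PySem.Int.mod (p.2 + d.2) m)

def pvDirs : List (Int × Int) := [(0, 1), (1, 0), (0, -1), (-1, 0)]

-- A's backtracking loop `while (r,c) != start: path.append((r,c)); (r,c) = prev[(r,c)]`.
-- The fuel only makes the loop total; on admitted inputs the prev-chain reaches start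
-- within dist+1 steps, so the fuel dist+2 passed below is never exhausted.
def pvReconA (prev : PySem.Dict (Int × Int) (Option (Int × Int))) (start : Int × Int) :
    Nat → (Int × Int) → List (Int × Int) → List (Int × Int)
  | 0, _, acc => acc
  | f + 1, p, acc =>
    if p = start then acc ++ [start]
    else
      match prev.get? p with
      | some (some q) => pvReconA prev start f q (acc ++ [p])
      | _ => acc ++ [p]   -- KeyError / None parent: unreachable on admitted inputs

-- one direction of A's `for dr, dc in directions:` body
def pvStepA (zido : List (List Int)) (n m : Int) (p : Int × Int) (dist : Int)
    (st : List ((Int × Int) × Int) × List (List Bool) × PySem.Dict (Int × Int) (Option (Int × Int)))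
    (d : Int × Int) :
    List ((Int × Int) × Int) × List (List Bool) × PySem.Dict (Int × Int) (Option (Int × Int)) :=
  match st with
  | (qs, vis, prev) =>
    let q := pvWrap p d n m
    if pvGetB vis q = false ∧ 0 < pvZ zido q then
      (qs ++ [(q, dist + 1)], pvSetB vis q, prev.insert q (some p))
    else (qs, vis, prev)

-- A's `while queue:` loop; fuel n*m+1 bounds the number of dequeues (each enqueue
-- marks an unvisited cell visited, so at most n*m+1 entries ever enter the queue)
def pvLoopA (zido : List (List Int)) (start end_ : Int × Int) (n m : Int) :
    Nat → List ((Int × Int) × Int) → List (List Bool) →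
    PySem.Dict (Int × Int) (Option (Int × Int)) → Int × List (Int × Int)
  | 0, _, _, _ => (-1, [])
  | _ + 1, [], _, _ => (-1, [])
  | f + 1, (p, dist) :: qs, vis, prev =>
    if p = end_ then (dist, (pvReconA prev start (dist.toNat + 2) p []).reverse)
    else
      match pvDirs.foldl (pvStepA zido n m p dist) (qs, vis, prev) with
      | (qs', vis', prev') => pvLoopA zido start end_ n m f qs' vis' prev'

def bfs (zido : List (List Int)) (start : Int × Int) (end_ : Int × Int) (n : Int) (m : Int) :
    Int × (List (Int × Int)) :=
  pvLoopA zido start end_ n m (n.toNat * m.toNat + 1) [(start, 0)]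
    (List.replicate n.toNat (List.replicate m.toNat false))
    ((PySem.Dict.empty).insert start none)

-- ===== PORT B =====
-- the four wraparound neighbour positions, in B's fixed order
def pvNbrs4 (p : Int × Int) (n m : Int) : List (Int × Int) :=
  [(PySem.Int.mod p.1 n, PySem.Int.mod (p.2 + 1) m),
   (PySem.Int.mod (p.1 + 1) n, PySem.Int.mod p.2 m),
   (PySem.Int.mod p.1 n, PySem.Int.mod (p.2 - 1) m),
   (PySem.Int.mod (p.1 - 1) n, PySem.Int.mod p.2 m)]

-- body of B's inner `for pos in (...)` loop
def pvStepL (zido : List (List Int)) (path : List (Int × Int))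
    (st : List ((Int × Int) × List (Int × Int)) × List (List Bool)) (q : Int × Int) :
    List ((Int × Int) × List (Int × Int)) × List (List Bool) :=
  if pvGetB st.2 q = false ∧ 0 < pvZ zido q then
    (st.1 ++ [(q, path ++ [q])], pvSetB st.2 q)
  else st

-- body of B's `for (r, c), path in frontier:` loop
def pvExpandCell (zido : List (List Int)) (n m : Int)
    (st : List ((Int × Int) × List (Int × Int)) × List (List Bool))
    (e : (Int × Int) × List (Int × Int)) :
    List ((Int × Int) × List (Int × Int)) × List (List Bool) :=
  (pvNbrs4 e.1 n m).foldl (pvStepL zido e.2) st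

-- B's `for cell, path in frontier: if cell == end: return depth, path`
def pvFindEnd (end_ : Int × Int) :
    List ((Int × Int) × List (Int × Int)) → Option (List (Int × Int))
  | [] => none
  | e :: rest => if e.1 = end_ then some e.2 else pvFindEnd end_ rest

-- B's `while frontier:` loop, one fuel unit per LAYER (n*m+1 layers always suffice:
-- every layer retires at least one queue slot of the n*m+1 that can ever exist)
def pvLevel (zido : List (List Int)) (end_ : Int × Int) (n m : Int) :
    Nat → Int → List ((Int × Int) × List (Int × Int)) → List (List Bool) →
    Int × List (Int × Int)
  | 0, _, _, _ => (-1, [])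
  | _ + 1, _, [], _ => (-1, [])
  | f + 1, depth, e :: rest, vis =>
    match pvFindEnd end_ (e :: rest) with
    | some path => (depth, path)
    | none =>
      match (e :: rest).foldl (pvExpandCell zido n m) ([], vis) with
      | (nxt, vis') => pvLevel zido end_ n m f (depth + 1) nxt vis'

def bfs_alt (zido : List (List Int)) (start : Int × Int) (end_ : Int × Int) (n : Int) (m : Int) :
    Int × (List (Int × Int)) :=
  pvLevel zido end_ n m (n.toNat * m.toNat + 1) 0 [(start, [start])]
    (List.replicate n.toNat (List.replicate m.toNat false))

-- ===== PRECONDITION & SPEC =====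
-- Pre_ excludes inputs where the Python raises (n = 0 or m = 0 gives ZeroDivisionError
-- unless start == end; a grid with fewer than n rows, or a short row among the first n
-- that BFS touches, gives IndexError).  It also excludes ragged grids on which A
-- happens to return because BFS never reaches the short row: whether such a grid
-- raises is not a closed-form condition on the input, so Pre_ conservatively requires
-- the first n rows to have length ≥ m.
def Pre_bfs (zido : List (List Int)) (start : Int × Int) (end_ : Int × Int) (n : Int) (m : Int) : Prop :=
  start = end_ ∨
    (0 < n ∧ 0 < m ∧ n ≤ (zido.length : Int) ∧
      ∀ row ∈ zido.take n.toNat, (m : Int) ≤ row.length)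
instance (zido : List (List Int)) (start : Int × Int) (end_ : Int × Int) (n : Int) (m : Int) : Decidable (Pre_bfs zido start end_ n m) := by unfold Pre_bfs; infer_instance

def pvWitness_bfs : List (List Int) × (Int × Int) × (Int × Int) × Int × Int :=
  ([[1, 1], [1, 1]], (0, 0), (1, 1), 2, 2)

def Spec_bfs (zido : List (List Int)) (start : Int × Int) (end_ : Int × Int) (n : Int) (m : Int) (out : Int × (List (Int × Int))) : Prop := out = bfs_alt zido start end_ n m
instance (zido : List (List Int)) (start : Int × Int) (end_ : Int × Int) (n : Int) (m : Int) (out : Int × (List (Int × Int))) : Decidable (Spec_bfs zido start end_ n m out) := by unfold Spec_bfs; infer_instance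

-- ===== CLAIM (what is proved, stated in full; the proofs are below) =====
def Claim_equal_bfs : Prop := ∀ (zido : List (List Int)) (start : Int × Int) (end_ : Int × Int) (n : Int) (m : Int), Dom_bfs zido start end_ n m → Pre_bfs zido start end_ n m → Spec_bfs zido start end_ n m (bfs zido start end_ n m)

-- ===== LEMMAS AND PROOFS =====
-- Plan: (1) lockstep, A's deque loop equals a proof-only path-carrying FIFO loop
-- pvFifo (the prev-chain of a dequeued node is exactly the carried path);
-- (2) pvFifo equals B's level loop: a layer of pvFifo dequeues is one pvLevel step,
-- with a visited-count measure showing both fuels n*m+1 are never exhausted.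

-- a cell produced by the wraparound `%` lies inside the n×m box
def PvIn (n m : Int) (x : Int × Int) : Prop :=
  0 ≤ x.1 ∧ x.1 < n ∧ 0 ≤ x.2 ∧ x.2 < m

-- the visited matrix has shape n×m
def PvShape (n m : Int) (v : List (List Bool)) : Prop :=
  v.length = n.toNat ∧ ∀ row ∈ v, row.length = m.toNat

-- proof-only FIFO loop: A's queue order, but carrying paths like B
def pvStepF (zido : List (List Int)) (n m : Int) (p : Int × Int) (path : List (Int × Int))
    (st : List ((Int × Int) × List (Int × Int)) × List (List Bool)) (d : Int × Int) :
    List ((Int × Int) × List (Int × Int)) × List (List Bool) :=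
  match st with
  | (qs, vis) =>
    let q := pvWrap p d n m
    if pvGetB vis q = false ∧ 0 < pvZ zido q then
      (qs ++ [(q, path ++ [q])], pvSetB vis q)
    else (qs, vis)

def pvFifo (zido : List (List Int)) (end_ : Int × Int) (n m : Int) :
    Nat → List ((Int × Int) × List (Int × Int)) → List (List Bool) → Int × List (Int × Int)
  | 0, _, _ => (-1, [])
  | _ + 1, [], _ => (-1, [])
  | f + 1, (p, path) :: qs, vis =>
    if p = end_ then ((path.length : Int) - 1, path)
    else
      match pvDirs.foldl (pvStepF zido n m p path) (qs, vis) with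
      | (qs', vis') => pvFifo zido end_ n m f qs' vis'

-- every cell on a stored path is the start or already marked visited (in the box)
def PvPathVis (start : Int × Int) (n m : Int) (v : List (List Bool)) (l : List (Int × Int)) : Prop :=
  ∀ x ∈ l, x = start ∨ (PvIn n m x ∧ pvGetB v x = true)

-- every wraparound neighbour of start is visited or blocked (holds after iteration 1)
def PvNbrs (zido : List (List Int)) (start : Int × Int) (n m : Int) (v : List (List Bool)) : Prop :=
  ∀ d ∈ pvDirs, pvGetB v (pvWrap start d n m) = true ∨ ¬ (0 < pvZ zido (pvWrap start d n m))

-- l is exactly the prev-pointer chain from start to p that A's backtracking rebuilds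
inductive PvChain (prev : PySem.Dict (Int × Int) (Option (Int × Int))) (start : Int × Int) :
    (Int × Int) → List (Int × Int) → Prop
  | base : PvChain prev start start [start]
  | step {p q : Int × Int} {l : List (Int × Int)} : p ≠ start → prev.get? p = some (some q) →
      PvChain prev start q l → PvChain prev start p (l ++ [p])

-- relation between one A-queue entry and the parallel FIFO-queue entry
def PvEnt (start : Int × Int) (n m : Int) (v : List (List Bool))
    (prev : PySem.Dict (Int × Int) (Option (Int × Int)))
    (a : (Int × Int) × Int) (b : (Int × Int) × List (Int × Int)) : Prop :=
  b.1 = a.1 ∧ ((b.2.length : Int) = a.2 + 1) ∧ PvPathVis start n m v b.2 ∧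
    (PvChain prev start a.1 b.2 ∨ a.1 = start)

lemma pvRecon_chain {prev : PySem.Dict (Int × Int) (Option (Int × Int))} {start p : Int × Int}
    {l : List (Int × Int)} (h : PvChain prev start p l) :
    ∀ (f : Nat) (acc : List (Int × Int)), l.length ≤ f →
      pvReconA prev start f p acc = acc ++ l.reverse := by
  induction h with
  | base =>
    intro f acc hf
    cases f with
    | zero => simp at hf
    | succ g => simp [pvReconA]
  | @step p q l hne hget _ ih =>
    intro f acc hf
    cases f with
    | zero => simp at hf
    | succ g =>
      simp only [List.length_append, List.length_cons, List.length_nil] at hf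
      simp only [pvReconA, if_neg hne, hget]
      rw [ih g (acc ++ [p]) (by omega)]
      simp

lemma pvChain_mono {prev prev' : PySem.Dict (Int × Int) (Option (Int × Int))}
    {start p : Int × Int} {l : List (Int × Int)} (h : PvChain prev start p l)
    (hag : ∀ x ∈ l, x ≠ start → prev'.get? x = prev.get? x) :
    PvChain prev' start p l := by
  induction h with
  | base => exact PvChain.base
  | @step p q l hne hget _ ih =>
    refine PvChain.step hne ?_ (ih fun x hx hxs => hag x (by simp [hx]) hxs)
    rw [hag p (by simp) hne]; exact hget

lemma pvShape_setB {n m : Int} {v : List (List Bool)} (h : PvShape n m v) (q : Int × Int) :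
    PvShape n m (pvSetB v q) := by
  obtain ⟨h1, h2⟩ := h
  by_cases hi : q.1.toNat < v.length
  · refine ⟨by simpa [pvSetB] using h1, ?_⟩
    intro row hrow
    rcases List.mem_or_eq_of_mem_set hrow with hmem | heq
    · exact h2 row hmem
    · subst heq
      rw [List.length_set, List.getD_eq_getElem _ _ hi]
      exact h2 _ (List.getElem_mem hi)
  · unfold pvSetB
    rw [List.set_eq_of_length_le (by omega)]
    exact ⟨h1, h2⟩

lemma pvGetB_setB_self {n m : Int} {v : List (List Bool)} {q : Int × Int}
    (hs : PvShape n m v) (hq : PvIn n m q) : pvGetB (pvSetB v q) q = true := by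
  obtain ⟨h1, h2⟩ := hs
  obtain ⟨ha, hb, hc, hd⟩ := hq
  have hi : q.1.toNat < v.length := by omega
  have hrow : (v.getD q.1.toNat []).length = m.toNat := by
    rw [List.getD_eq_getElem _ _ hi]; exact h2 _ (List.getElem_mem hi)
  have hj : q.2.toNat < (v.getD q.1.toNat []).length := by omega
  simp only [pvGetB, pvSetB, List.getD_eq_getElem?_getD] at hj ⊢
  rw [List.getElem?_set_self hi, Option.getD_some, List.getElem?_set_self hj, Option.getD_some]

lemma pvGetB_setB_mono {v : List (List Bool)} {q : Int × Int} (x : Int × Int)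
    (hx : pvGetB v x = true) : pvGetB (pvSetB v q) x = true := by
  simp only [pvGetB, pvSetB, List.getD_eq_getElem?_getD] at hx ⊢
  by_cases hi : x.1.toNat = q.1.toNat
  · rw [hi] at hx ⊢
    by_cases hr : q.1.toNat < v.length
    · rw [List.getElem?_set_self hr, Option.getD_some]
      by_cases hj : x.2.toNat = q.2.toNat
      · rw [hj] at hx ⊢
        by_cases hc : q.2.toNat < (v[q.1.toNat]?.getD []).length
        · rw [List.getElem?_set_self hc, Option.getD_some]
        · rw [List.set_eq_of_length_le (by omega)]
          exact hx
      · rw [List.getElem?_set_ne (by omega)]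
        exact hx
    · rw [List.set_eq_of_length_le (by omega)]
      exact hx
  · rw [List.getElem?_set_ne (by omega)]
    exact hx

lemma pvPathVis_mono {start : Int × Int} {n m : Int} {v v' : List (List Bool)}
    {l : List (Int × Int)} (h : PvPathVis start n m v l)
    (hmono : ∀ x, pvGetB v x = true → pvGetB v' x = true) : PvPathVis start n m v' l := by
  intro x hx
  rcases h x hx with h1 | ⟨h2, h3⟩
  · exact Or.inl h1
  · exact Or.inr ⟨h2, hmono x h3⟩

lemma pvForall₂_append {α β : Type} {R : α → β → Prop} :
    ∀ {l₁ : List α} {l₂ : List β} {u₁ : List α} {u₂ : List β},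
      List.Forall₂ R l₁ l₂ → List.Forall₂ R u₁ u₂ → List.Forall₂ R (l₁ ++ u₁) (l₂ ++ u₂) := by
  intro l₁ l₂ u₁ u₂ h1 h2
  induction h1 with
  | nil => simpa
  | cons h _ ih => simpa using List.Forall₂.cons h ih

lemma pvWrap_in {n m : Int} (hn : 0 < n) (hm : 0 < m) (p d : Int × Int) :
    PvIn n m (pvWrap p d n m) :=
  ⟨PySem.Int.mod_nonneg _ hn, PySem.Int.mod_lt _ hn, PySem.Int.mod_nonneg _ hm,
    PySem.Int.mod_lt _ hm⟩

-- the lockstep expansion of one dequeued node, over any tail of the direction list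
lemma pvFold_eq (zido : List (List Int)) (start : Int × Int) (n m : Int)
    (hn : 0 < n) (hm : 0 < m) :
    ∀ (ds : List (Int × Int)), (∀ d ∈ ds, d ∈ pvDirs) →
    ∀ (p : Int × Int) (dPar : Int) (l : List (Int × Int))
      (qA : List ((Int × Int) × Int)) (qB : List ((Int × Int) × List (Int × Int)))
      (vis : List (List Bool)) (prev : PySem.Dict (Int × Int) (Option (Int × Int))),
      PvShape n m vis →
      (l.length : Int) = dPar + 1 →
      PvPathVis start n m vis l →
      (PvChain prev start p l ∨ (p = start ∧ PvNbrs zido start n m vis)) →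
      List.Forall₂ (PvEnt start n m vis prev) qA qB →
      ∃ qA2 qB2 vis2 prev2,
        List.foldl (pvStepA zido n m p dPar) (qA, vis, prev) ds = (qA2, vis2, prev2) ∧
        List.foldl (pvStepF zido n m p l) (qB, vis) ds = (qB2, vis2) ∧
        PvShape n m vis2 ∧
        (∀ x, pvGetB vis x = true → pvGetB vis2 x = true) ∧
        List.Forall₂ (PvEnt start n m vis2 prev2) qA2 qB2 ∧
        (∀ d ∈ ds, pvGetB vis2 (pvWrap p d n m) = true ∨ ¬ (0 < pvZ zido (pvWrap p d n m))) := by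
  intro ds
  induction ds with
  | nil =>
    intro _ p dPar l qA qB vis prev hs _ _ _ hq
    exact ⟨qA, qB, vis, prev, rfl, rfl, hs, fun _ h => h, hq, by simp⟩
  | cons d ds ih =>
    intro hds p dPar l qA qB vis prev hs hlen hpv hch hq
    have hd : d ∈ pvDirs := hds d (by simp)
    by_cases hg : pvGetB vis (pvWrap p d n m) = false ∧ 0 < pvZ zido (pvWrap p d n m)
    · -- the neighbour is enqueued (identically on both sides)
      have hchain : PvChain prev start p l := by
        rcases hch with h | ⟨hps, hnb⟩
        · exact h
        · exfalso
          rcases hnb d hd with h1 | h2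
          · rw [← hps] at h1; rw [h1] at hg; exact absurd hg.1 (by simp)
          · rw [← hps] at h2; exact h2 hg.2
      have hqin : PvIn n m (pvWrap p d n m) := pvWrap_in hn hm p d
      have hmono1 : ∀ x, pvGetB vis x = true → pvGetB (pvSetB vis (pvWrap p d n m)) x = true :=
        fun x hx => pvGetB_setB_mono x hx
      have hs1 : PvShape n m (pvSetB vis (pvWrap p d n m)) := pvShape_setB hs _
      have hfresh : ∀ x, pvGetB vis x = true → x ≠ pvWrap p d n m := by
        intro x hx hxq; rw [hxq, hg.1] at hx; exact absurd hx (by simp)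
      have hcp1 : ∀ p' l', PvPathVis start n m vis l' → PvChain prev start p' l' →
          PvChain (prev.insert (pvWrap p d n m) (some p)) start p' l' := by
        intro p' l' hpv' hch'
        refine pvChain_mono hch' ?_
        intro x hx hxs
        rcases hpv' x hx with h1 | ⟨h2, h3⟩
        · exact absurd h1 hxs
        · exact PySem.Dict.get?_insert_of_ne _ _ (hfresh x h3)
      have hch1 : PvChain (prev.insert (pvWrap p d n m) (some p)) start p l := hcp1 p l hpv hchain
      have hpv1 : PvPathVis start n m (pvSetB vis (pvWrap p d n m)) l := pvPathVis_mono hpv hmono1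
      have hqvis1 : pvGetB (pvSetB vis (pvWrap p d n m)) (pvWrap p d n m) = true :=
        pvGetB_setB_self hs hqin
      have hent : PvEnt start n m (pvSetB vis (pvWrap p d n m))
          (prev.insert (pvWrap p d n m) (some p))
          (pvWrap p d n m, dPar + 1) (pvWrap p d n m, l ++ [pvWrap p d n m]) := by
        refine ⟨rfl, by simp; omega, ?_, ?_⟩
        · intro x hx
          rcases List.mem_append.mp hx with h1 | h2
          · exact hpv1 x h1
          · rw [List.mem_singleton.mp h2]; exact Or.inr ⟨hqin, hqvis1⟩
        · by_cases hqs : pvWrap p d n m = start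
          · exact Or.inr hqs
          · exact Or.inl (PvChain.step hqs (PySem.Dict.get?_insert_self _ _ _) hch1)
      have hq1 : List.Forall₂
          (PvEnt start n m (pvSetB vis (pvWrap p d n m)) (prev.insert (pvWrap p d n m) (some p)))
          (qA ++ [(pvWrap p d n m, dPar + 1)]) (qB ++ [(pvWrap p d n m, l ++ [pvWrap p d n m])]) := by
        refine pvForall₂_append ?_ (List.forall₂_cons.mpr ⟨hent, List.Forall₂.nil⟩)
        refine hq.imp ?_
        rintro a b ⟨e1, e2, e3, e4⟩
        exact ⟨e1, e2, pvPathVis_mono e3 hmono1,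
          e4.imp (fun hc => hcp1 _ _ e3 hc) id⟩
      obtain ⟨qA2, qB2, vis2, prev2, e1, e2, h3, h4, h5, h6⟩ :=
        ih (fun d' hd' => hds d' (by simp [hd'])) p dPar l
          (qA ++ [(pvWrap p d n m, dPar + 1)]) (qB ++ [(pvWrap p d n m, l ++ [pvWrap p d n m])])
          (pvSetB vis (pvWrap p d n m)) (prev.insert (pvWrap p d n m) (some p))
          hs1 hlen hpv1 (Or.inl hch1) hq1
      refine ⟨qA2, qB2, vis2, prev2, ?_, ?_, h3, fun x hx => h4 x (hmono1 x hx), h5, ?_⟩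
      · rw [List.foldl_cons, show pvStepA zido n m p dPar (qA, vis, prev) d =
          (qA ++ [(pvWrap p d n m, dPar + 1)], pvSetB vis (pvWrap p d n m),
            prev.insert (pvWrap p d n m) (some p)) by simp only [pvStepA]; rw [if_pos hg]]
        exact e1
      · rw [List.foldl_cons, show pvStepF zido n m p l (qB, vis) d =
          (qB ++ [(pvWrap p d n m, l ++ [pvWrap p d n m])], pvSetB vis (pvWrap p d n m)) by
            simp only [pvStepF]; rw [if_pos hg]]
        exact e2
      · intro d' hd'
        rcases List.mem_cons.mp hd' with rfl | hmem
        · exact Or.inl (h4 _ hqvis1)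
        · exact h6 d' hmem
    · -- guard false: both step functions leave the state unchanged
      have hstepA : pvStepA zido n m p dPar (qA, vis, prev) d = (qA, vis, prev) := by
        simp only [pvStepA]; rw [if_neg hg]
      have hstepF : pvStepF zido n m p l (qB, vis) d = (qB, vis) := by
        simp only [pvStepF]; rw [if_neg hg]
      obtain ⟨qA2, qB2, vis2, prev2, e1, e2, h3, h4, h5, h6⟩ :=
        ih (fun d' hd' => hds d' (by simp [hd'])) p dPar l qA qB vis prev hs hlen hpv hch hq
      refine ⟨qA2, qB2, vis2, prev2, ?_, ?_, h3, h4, h5, ?_⟩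
      · rw [List.foldl_cons, hstepA]; exact e1
      · rw [List.foldl_cons, hstepF]; exact e2
      · intro d' hd'
        rcases List.mem_cons.mp hd' with rfl | hmem
        · rcases not_and_or.mp hg with h | h
          · exact Or.inl (h4 _ (eq_true_of_ne_false h))
          · exact Or.inr h
        · exact h6 d' hmem

-- A's whole loop and the FIFO loop agree in lockstep once start's neighbours are settled
lemma pvLoop_eq (zido : List (List Int)) (start end_ : Int × Int) (n m : Int)
    (hn : 0 < n) (hm : 0 < m) (hse : start ≠ end_) :
    ∀ (f : Nat) (qA : List ((Int × Int) × Int)) (qB : List ((Int × Int) × List (Int × Int)))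
      (vis : List (List Bool)) (prev : PySem.Dict (Int × Int) (Option (Int × Int))),
      PvShape n m vis → PvNbrs zido start n m vis →
      List.Forall₂ (PvEnt start n m vis prev) qA qB →
      pvLoopA zido start end_ n m f qA vis prev = pvFifo zido end_ n m f qB vis := by
  intro f
  induction f with
  | zero => intro qA qB vis prev _ _ _; rfl
  | succ f ih =>
    intro qA qB vis prev hs hnb hq
    cases hq with
    | nil => rfl
    | @cons a b qA' qB' hab hq' =>
      obtain ⟨p, dPar⟩ := a
      obtain ⟨p', l⟩ := b
      obtain ⟨e1, e2, e3, e4⟩ := hab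
      simp only at e1 e2 e3 e4
      subst e1
      by_cases hend : p' = end_
      · -- both return here; A rebuilds exactly the carried path
        have hchain : PvChain prev start p' l := by
          rcases e4 with h | h
          · exact h
          · exact absurd (h ▸ hend) hse
        have hrec : pvReconA prev start (dPar.toNat + 2) p' [] = l.reverse := by
          rw [pvRecon_chain hchain (dPar.toNat + 2) [] (by omega)]; simp
        simp only [pvLoopA, pvFifo, if_pos hend, hrec, List.reverse_reverse]
        exact Prod.ext (by omega) rfl
      · obtain ⟨qA2, qB2, vis2, prev2, f1, f2, h3, h4, h5, h6⟩ :=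
          pvFold_eq zido start n m hn hm pvDirs (fun _ h => h) p' dPar l qA' qB' vis prev
            hs e2 e3 (e4.imp id (fun h => ⟨h, hnb⟩)) hq'
        simp only [pvLoopA, pvFifo, if_neg hend, f1, f2]
        exact ih qA2 qB2 vis2 prev2 h3
          (fun d hd => (hnb d hd).imp (h4 _) id) h5

-- A's program equals the FIFO loop (first iteration by hand, then lockstep)
lemma pvBfs_eq_fifo (zido : List (List Int)) (start end_ : Int × Int) (n m : Int)
    (hn : 0 < n) (hm : 0 < m) (hse : start ≠ end_) :
    bfs zido start end_ n m =
      pvFifo zido end_ n m (n.toNat * m.toNat + 1) [(start, [start])]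
        (List.replicate n.toNat (List.replicate m.toNat false)) := by
  obtain ⟨qA2, qB2, vis2, prev2, f1, f2, h3, h4, h5, h6⟩ :=
    pvFold_eq zido start n m hn hm pvDirs (fun _ h => h) start 0 [start] [] []
      (List.replicate n.toNat (List.replicate m.toNat false))
      ((PySem.Dict.empty).insert start none)
      ⟨by simp, by intro row hr; rw [List.eq_of_mem_replicate hr]; simp⟩
      (by simp)
      (by intro x hx; exact Or.inl (List.mem_singleton.mp hx))
      (Or.inl PvChain.base)
      List.Forall₂.nil
  unfold bfs
  simp only [pvLoopA, pvFifo, if_neg hse, f1, f2]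
  exact pvLoop_eq zido start end_ n m hn hm hse (n.toNat * m.toNat) qA2 qB2 vis2 prev2
    h3 h6 h5

-- ---------- part 2: the FIFO loop equals B's level loop ----------

-- number of visited cells
def pvCnt (v : List (List Bool)) : Nat := (v.map (fun r => r.count true)).sum

lemma pvCnt_le_aux : ∀ (v : List (List Bool)) (k : Nat),
    (∀ row ∈ v, row.length = k) → pvCnt v ≤ v.length * k := by
  intro v k
  induction v with
  | nil => intro _; simp [pvCnt]
  | cons r t ih =>
    intro h
    have h1 : r.count true ≤ k := by
      rw [← h r (by simp)]; exact List.count_le_length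
    have h2 := ih (fun row hr => h row (by simp [hr]))
    simp only [pvCnt, List.map_cons, List.sum_cons, List.length_cons] at *
    calc r.count true + (t.map fun r => r.count true).sum ≤ k + t.length * k := by omega
    _ = (t.length + 1) * k := by ring

lemma pvCnt_le {n m : Int} {v : List (List Bool)} (h : PvShape n m v) :
    pvCnt v ≤ n.toNat * m.toNat := by
  have := pvCnt_le_aux v m.toNat h.2
  rw [h.1] at this
  exact this

lemma pvCnt_set_row : ∀ (v : List (List Bool)) (i : Nat) (r' : List Bool), i < v.length →
    pvCnt (v.set i r') + (v.getD i []).count true = pvCnt v + r'.count true := by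
  intro v
  induction v with
  | nil => intro i r' h; simp at h
  | cons r t ih =>
    intro i r' h
    cases i with
    | zero => simp [pvCnt]; omega
    | succ j =>
      have := ih j r' (by simpa using h)
      simp only [pvCnt, List.set_cons_succ, List.map_cons, List.sum_cons, List.getD_cons_succ] at *
      omega

lemma pvCount_set_true : ∀ (r : List Bool) (j : Nat), j < r.length → r.getD j false = false →
    (r.set j true).count true = r.count true + 1 := by
  intro r
  induction r with
  | nil => intro j h; simp at h
  | cons b t ih =>
    intro j hj hb
    cases j with
    | zero =>
      simp only [List.getD_cons_zero] at hb
      subst hb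
      simp [List.count_cons]
    | succ j =>
      have := ih j (by simpa using hj) (by simpa using hb)
      simp only [List.set_cons_succ, List.count_cons] at *
      omega

lemma pvCnt_setB {n m : Int} {v : List (List Bool)} {q : Int × Int}
    (hs : PvShape n m v) (hq : PvIn n m q) (hfresh : pvGetB v q = false) :
    pvCnt (pvSetB v q) = pvCnt v + 1 := by
  obtain ⟨h1, h2⟩ := hs
  obtain ⟨ha, hb, hc, hd⟩ := hq
  have hi : q.1.toNat < v.length := by omega
  have hrow : (v.getD q.1.toNat []).length = m.toNat := by
    rw [List.getD_eq_getElem _ _ hi]; exact h2 _ (List.getElem_mem hi)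
  have hj : q.2.toNat < (v.getD q.1.toNat []).length := by omega
  have hcount := pvCount_set_true (v.getD q.1.toNat []) q.2.toNat hj hfresh
  have hset := pvCnt_set_row v q.1.toNat ((v.getD q.1.toNat []).set q.2.toNat true) hi
  unfold pvSetB
  omega

-- one neighbour step preserves shape and the queue-length-plus-count budget
lemma pvStepL_inv {zido : List (List Int)} {n m : Int} {path : List (Int × Int)}
    {st : List ((Int × Int) × List (Int × Int)) × List (List Bool)} {q : Int × Int}
    (hs : PvShape n m st.2) (hq : PvIn n m q) :
    PvShape n m (pvStepL zido path st q).2 ∧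
    (pvStepL zido path st q).1.length + pvCnt st.2 = st.1.length + pvCnt (pvStepL zido path st q).2 ∧
    (∀ e ∈ (pvStepL zido path st q).1, e ∈ st.1 ∨ ∃ x, e = (x, path ++ [x])) := by
  unfold pvStepL
  by_cases hg : pvGetB st.2 q = false ∧ 0 < pvZ zido q
  · rw [if_pos hg]
    refine ⟨pvShape_setB hs _, ?_, ?_⟩
    · simp only [List.length_append, List.length_cons, List.length_nil,
        pvCnt_setB hs hq hg.1]
      omega
    · intro e he
      rcases List.mem_append.mp he with h | h
      · exact Or.inl h
      · exact Or.inr ⟨q, List.mem_singleton.mp h⟩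
  · rw [if_neg hg]
    exact ⟨hs, rfl, fun e he => Or.inl he⟩

-- expanding one frontier cell: fold pvStepL over its four neighbours
lemma pvExpandCell_inv {zido : List (List Int)} {n m : Int} (hn : 0 < n) (hm : 0 < m)
    (e : (Int × Int) × List (Int × Int)) :
    ∀ (qs : List (Int × Int)), (∀ q ∈ qs, PvIn n m q) →
    ∀ (st : List ((Int × Int) × List (Int × Int)) × List (List Bool)), PvShape n m st.2 →
    PvShape n m (qs.foldl (pvStepL zido e.2) st).2 ∧
    (qs.foldl (pvStepL zido e.2) st).1.length + pvCnt st.2 =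
      st.1.length + pvCnt (qs.foldl (pvStepL zido e.2) st).2 ∧
    (∀ e' ∈ (qs.foldl (pvStepL zido e.2) st).1, e' ∈ st.1 ∨ ∃ x, e' = (x, e.2 ++ [x])) := by
  intro qs
  induction qs with
  | nil => intro _ st hs; exact ⟨hs, rfl, fun e' he' => Or.inl he'⟩
  | cons q qs ih =>
    intro hqs st hs
    obtain ⟨s1, s2, s3⟩ := pvStepL_inv (zido := zido) (path := e.2) (st := st) hs (hqs q (by simp))
    obtain ⟨t1, t2, t3⟩ := ih (fun q' hq' => hqs q' (by simp [hq'])) (pvStepL zido e.2 st q) s1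
    refine ⟨t1, by simp only [List.foldl_cons] at *; omega, ?_⟩
    intro e' he'
    simp only [List.foldl_cons] at he'
    rcases t3 e' he' with h | h
    · rcases s3 e' h with h' | h'
      · exact Or.inl h'
      · exact Or.inr h'
    · exact Or.inr h

lemma pvNbrs4_in {n m : Int} (hn : 0 < n) (hm : 0 < m) (p : Int × Int) :
    ∀ q ∈ pvNbrs4 p n m, PvIn n m q := by
  intro q hq
  have base : ∀ a b : Int, PvIn n m (PySem.Int.mod a n, PySem.Int.mod b m) := fun a b =>
    ⟨PySem.Int.mod_nonneg _ hn, PySem.Int.mod_lt _ hn,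
      PySem.Int.mod_nonneg _ hm, PySem.Int.mod_lt _ hm⟩
  simp only [pvNbrs4, List.mem_cons, List.not_mem_nil, or_false] at hq
  rcases hq with h | h | h | h <;> (subst h; exact base _ _)

-- the neighbour tuple of B is the mapped direction list of the FIFO loop
lemma pvNbrs4_eq_map (p : Int × Int) (n m : Int) :
    pvNbrs4 p n m = pvDirs.map (fun d => pvWrap p d n m) := by
  simp [pvNbrs4, pvDirs, pvWrap, sub_eq_add_neg]

-- the FIFO expansion of one cell is pvExpandCell, with the untouched queue tail in front
lemma pvFifoFold_eq_expand (zido : List (List Int)) (n m : Int) (p : Int × Int)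
    (path : List (Int × Int)) :
    ∀ (ds : List (Int × Int)) (q0 acc : List ((Int × Int) × List (Int × Int)))
      (vis : List (List Bool)),
      ds.foldl (pvStepF zido n m p path) (q0 ++ acc, vis) =
        (q0 ++ ((ds.map (fun d => pvWrap p d n m)).foldl (pvStepL zido path) (acc, vis)).1,
          ((ds.map (fun d => pvWrap p d n m)).foldl (pvStepL zido path) (acc, vis)).2) := by
  intro ds
  induction ds with
  | nil => intro q0 acc vis; simp
  | cons d ds ih =>
    intro q0 acc vis
    have hstep : pvStepF zido n m p path (q0 ++ acc, vis) d =
        (q0 ++ (pvStepL zido path (acc, vis) (pvWrap p d n m)).1,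
          (pvStepL zido path (acc, vis) (pvWrap p d n m)).2) := by
      simp only [pvStepF, pvStepL]
      by_cases hg : pvGetB vis (pvWrap p d n m) = false ∧ 0 < pvZ zido (pvWrap p d n m)
      · rw [if_pos hg, if_pos hg]; simp
      · rw [if_neg hg, if_neg hg]
    simp only [List.foldl_cons, List.map_cons, hstep]
    rw [ih q0 (pvStepL zido path (acc, vis) (pvWrap p d n m)).1
      (pvStepL zido path (acc, vis) (pvWrap p d n m)).2]

lemma pvFindEnd_mem {end_ : Int × Int} :
    ∀ {l : List ((Int × Int) × List (Int × Int))} {path : List (Int × Int)},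
      pvFindEnd end_ l = some path → (end_, path) ∈ l := by
  intro l
  induction l with
  | nil => intro path h; simp [pvFindEnd] at h
  | cons e rest ih =>
    intro path h
    simp only [pvFindEnd] at h
    by_cases he : e.1 = end_
    · rw [if_pos he] at h
      cases h
      rw [show (end_, e.2) = e by rw [← he]]
      exact List.mem_cons_self
    · rw [if_neg he] at h
      exact List.mem_cons_of_mem _ (ih h)

-- the FIFO loop over a target-free layer prefix: dequeue-and-expand each entry in order
lemma pvFifo_layer_none (zido : List (List Int)) (end_ : Int × Int) (n m : Int)
    (hn : 0 < n) (hm : 0 < m) :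
    ∀ (rest : List ((Int × Int) × List (Int × Int)))
      (acc : List ((Int × Int) × List (Int × Int))) (vis : List (List Bool)) (f : Nat),
      pvFindEnd end_ rest = none → rest.length ≤ f →
      pvFifo zido end_ n m f (rest ++ acc) vis =
        pvFifo zido end_ n m (f - rest.length)
          (rest.foldl (pvExpandCell zido n m) (acc, vis)).1
          (rest.foldl (pvExpandCell zido n m) (acc, vis)).2 := by
  intro rest
  induction rest with
  | nil => intro acc vis f _ _; simp
  | cons e rest ih =>
    intro acc vis f hfe hf
    obtain ⟨p, path⟩ := e
    simp only [pvFindEnd] at hfe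
    by_cases hp : p = end_
    · rw [if_pos hp] at hfe; cases hfe
    · rw [if_neg hp] at hfe
      obtain ⟨f', rfl⟩ : ∃ f', f = f' + 1 := by
        cases f with
        | zero => simp at hf
        | succ g => exact ⟨g, rfl⟩
      have hfold := pvFifoFold_eq_expand zido n m p path pvDirs rest acc vis
      rw [← pvNbrs4_eq_map] at hfold
      simp only [List.cons_append, pvFifo, if_neg hp, hfold]
      have := ih (pvExpandCell zido n m (acc, vis) (p, path)).1
        (pvExpandCell zido n m (acc, vis) (p, path)).2 f' hfe (by simpa using hf)
      simp only [pvExpandCell] at this ⊢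
      simpa using this

-- the FIFO loop when the target sits somewhere in the current layer
lemma pvFifo_layer_some (zido : List (List Int)) (end_ : Int × Int) (n m : Int)
    (hn : 0 < n) (hm : 0 < m) :
    ∀ (rest : List ((Int × Int) × List (Int × Int)))
      (acc : List ((Int × Int) × List (Int × Int))) (vis : List (List Bool)) (f : Nat)
      (path : List (Int × Int)),
      pvFindEnd end_ rest = some path → rest.length ≤ f →
      pvFifo zido end_ n m f (rest ++ acc) vis = ((path.length : Int) - 1, path) := by
  intro rest
  induction rest with
  | nil => intro acc vis f path h; simp [pvFindEnd] at h
  | cons e rest ih =>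
    intro acc vis f path hfe hf
    obtain ⟨p, pa⟩ := e
    obtain ⟨f', rfl⟩ : ∃ f', f = f' + 1 := by
      cases f with
      | zero => simp at hf
      | succ g => exact ⟨g, rfl⟩
    simp only [pvFindEnd] at hfe
    by_cases hp : p = end_
    · rw [if_pos hp] at hfe
      cases hfe
      simp only [List.cons_append, pvFifo, if_pos hp]
    · rw [if_neg hp] at hfe
      have hfold := pvFifoFold_eq_expand zido n m p pa pvDirs rest acc vis
      rw [← pvNbrs4_eq_map] at hfold
      simp only [List.cons_append, pvFifo, if_neg hp, hfold]
      exact ih _ _ f' path hfe (by simpa using hf)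

-- expanding a whole layer: shape, budget identity, and provenance of the new entries
lemma pvExpand_inv (zido : List (List Int)) (n m : Int) (hn : 0 < n) (hm : 0 < m) :
    ∀ (frontier acc : List ((Int × Int) × List (Int × Int))) (vis : List (List Bool)),
      PvShape n m vis →
      PvShape n m (frontier.foldl (pvExpandCell zido n m) (acc, vis)).2 ∧
      (frontier.foldl (pvExpandCell zido n m) (acc, vis)).1.length + pvCnt vis =
        acc.length + pvCnt (frontier.foldl (pvExpandCell zido n m) (acc, vis)).2 ∧
      (∀ e' ∈ (frontier.foldl (pvExpandCell zido n m) (acc, vis)).1,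
        e' ∈ acc ∨ ∃ x e, e ∈ frontier ∧ e' = (x, e.2 ++ [x])) := by
  intro frontier
  induction frontier with
  | nil => intro acc vis hs; exact ⟨hs, rfl, fun e' he' => Or.inl he'⟩
  | cons e frontier ih =>
    intro acc vis hs
    obtain ⟨s1, s2, s3⟩ := pvExpandCell_inv (zido := zido) hn hm e (pvNbrs4 e.1 n m)
      (pvNbrs4_in hn hm e.1) (acc, vis) hs
    obtain ⟨t1, t2, t3⟩ := ih (pvExpandCell zido n m (acc, vis) e).1
      (pvExpandCell zido n m (acc, vis) e).2 s1
    have hcell : pvExpandCell zido n m (acc, vis) e =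
        ((pvExpandCell zido n m (acc, vis) e).1, (pvExpandCell zido n m (acc, vis) e).2) := rfl
    refine ⟨by simpa [List.foldl_cons, ← hcell] using t1, ?_, ?_⟩
    · simp only [List.foldl_cons, ← hcell] at t2 ⊢
      have s2' : (pvExpandCell zido n m (acc, vis) e).1.length + pvCnt vis =
          acc.length + pvCnt (pvExpandCell zido n m (acc, vis) e).2 := s2
      omega
    · intro e' he'
      simp only [List.foldl_cons, ← hcell] at he'
      rcases t3 e' he' with h | ⟨x, e2, he2, hx⟩
      · rcases s3 e' h with h' | ⟨x, hx⟩
        · exact Or.inl h'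
        · exact Or.inr ⟨x, e, by simp, hx⟩
      · exact Or.inr ⟨x, e2, by simp [he2], hx⟩

-- the FIFO loop equals B's level loop, layer by layer
lemma pvFifo_eq_level (zido : List (List Int)) (end_ : Int × Int) (n m : Int)
    (hn : 0 < n) (hm : 0 < m) :
    ∀ (f : Nat), ∀ (fB : Nat) (frontier : List ((Int × Int) × List (Int × Int)))
      (vis : List (List Bool)) (depth : Int),
      PvShape n m vis →
      (∀ e ∈ frontier, ((e.2.length : Int) = depth + 1)) →
      frontier.length + (n.toNat * m.toNat - pvCnt vis) ≤ f →
      frontier.length + (n.toNat * m.toNat - pvCnt vis) ≤ fB →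
      pvFifo zido end_ n m f frontier vis = pvLevel zido end_ n m fB depth frontier vis := by
  intro f
  induction f using Nat.strong_induction_on with
  | _ f ih =>
    intro fB frontier vis depth hs hlen hf hfB
    cases frontier with
    | nil =>
      cases f <;> cases fB <;> rfl
    | cons e rest =>
      obtain ⟨f', rfl⟩ : ∃ f', f = f' + 1 := by
        cases f with
        | zero => simp at hf
        | succ g => exact ⟨g, rfl⟩
      obtain ⟨fB', rfl⟩ : ∃ g, fB = g + 1 := by
        cases fB with
        | zero => simp at hfB
        | succ g => exact ⟨g, rfl⟩
      cases hfind : pvFindEnd end_ (e :: rest) with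
      | some path =>
        have hmem := pvFindEnd_mem hfind
        have hlenp : (path.length : Int) = depth + 1 := hlen _ hmem
        have := pvFifo_layer_some zido end_ n m hn hm (e :: rest) [] vis (f' + 1) path hfind
          (by simp only [List.length_cons] at hf ⊢; omega)
        rw [List.append_nil] at this
        rw [this]
        simp only [pvLevel, hfind]
        exact Prod.ext (by simp; omega) rfl
      | none =>
        have hcnt : pvCnt vis ≤ n.toNat * m.toNat := pvCnt_le hs
        obtain ⟨x1, x2, x3⟩ := pvExpand_inv zido n m hn hm (e :: rest) [] vis hs
        have hcnt' : pvCnt ((e :: rest).foldl (pvExpandCell zido n m) ([], vis)).2 ≤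
            n.toNat * m.toNat := pvCnt_le x1
        have hlay := pvFifo_layer_none zido end_ n m hn hm (e :: rest) [] vis (f' + 1) hfind
          (by simp only [List.length_cons] at hf ⊢; omega)
        rw [List.append_nil] at hlay
        rw [hlay]
        simp only [pvLevel, hfind]
        have hrec : ((e :: rest).foldl (pvExpandCell zido n m) ([], vis)) =
            (((e :: rest).foldl (pvExpandCell zido n m) ([], vis)).1,
              ((e :: rest).foldl (pvExpandCell zido n m) ([], vis)).2) := rfl
        rw [hrec]
        refine ih (f' + 1 - (e :: rest).length) ?_ fB' _ _ (depth + 1) x1 ?_ ?_ ?_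
        · simp only [List.length_cons] at hf ⊢
          omega
        · intro e' he'
          rcases x3 e' he' with h | ⟨x, e2, he2, hx⟩
          · simp at h
          · have := hlen e2 he2
            subst hx
            simp only [List.length_append, List.length_cons, List.length_nil]
            push_cast
            omega
        · simp only [List.length_nil, Nat.zero_add] at x2
          simp only [List.length_cons] at hf ⊢
          omega
        · simp only [List.length_nil, Nat.zero_add] at x2
          simp only [List.length_cons] at hf hfB ⊢
          omega

lemma pvCnt_replicate (a b : Nat) : pvCnt (List.replicate a (List.replicate b false)) = 0 := by
  induction a with
  | zero => rfl
  | succ a ih =>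
    simp only [List.replicate_succ, pvCnt, List.map_cons, List.sum_cons] at *
    simp [ih, List.count_replicate]

-- ===== VERDICT (by name: the statement is the Claim_ definition above) =====
theorem bfs_spec : Claim_equal_bfs := by
  intro zido start end_ n m _ hpre
  unfold Spec_bfs
  by_cases hse : start = end_
  · subst hse
    simp [bfs, bfs_alt, pvLoopA, pvLevel, pvFindEnd, pvReconA]
  · rcases hpre with h | ⟨hn, hm, _, _⟩
    · exact absurd h hse
    · rw [pvBfs_eq_fifo zido start end_ n m hn hm hse]
      refine pvFifo_eq_level zido end_ n m hn hm (n.toNat * m.toNat + 1)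
        (n.toNat * m.toNat + 1) [(start, [start])]
        (List.replicate n.toNat (List.replicate m.toNat false)) 0
        ⟨by simp, by intro row hr; rw [List.eq_of_mem_replicate hr]; simp⟩
        (by intro e he; rw [List.mem_singleton.mp he]; simp) ?_ ?_ <;>
      · rw [pvCnt_replicate]
        simp
        omega
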